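-- pv_equiv track=rewrite | github.com/rebuilder945/FL_research | ast_research/python_code_5.23/lastterm_page8/success_code/蔡禄易-2776-2023-05-23_17_39_24.py | myFun
-- ===== SOURCE A (Python) =====
-- def  myFun(a,b):
--        a = str(a)
--        b = str(b)
--        c = [ ]
--        for i in a:
--            i = int(i)
--            for x in b:
--                x = int(x)
--                m = i*x
--                c.append(m)
--                break
--        h = sum(c)-2
--        return h
-- ===== SOURCE B (Python) =====
-- def myFun(a, b):
--     # Arithmetic digit extraction: no string conversion at all.
--     s = 0
--     while a > 0:
--         s += a % 10
--         a //= 10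
--     f = b
--     while f >= 10:
--         f //= 10
--     return f * s - 2
-- ===== Notes on version B (the rewrite author's own statement) =====
-- stated objective: alternative
-- what changed: B drops the string conversions and double loop entirely: it extracts a's digit sum and b's leading digit by pure arithmetic (% 10 and // 10 loops) and returns leading_digit(b) * digit_sum(a) - 2, exploiting that A's inner loop breaks after the first digit of b.
import Mathlib
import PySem

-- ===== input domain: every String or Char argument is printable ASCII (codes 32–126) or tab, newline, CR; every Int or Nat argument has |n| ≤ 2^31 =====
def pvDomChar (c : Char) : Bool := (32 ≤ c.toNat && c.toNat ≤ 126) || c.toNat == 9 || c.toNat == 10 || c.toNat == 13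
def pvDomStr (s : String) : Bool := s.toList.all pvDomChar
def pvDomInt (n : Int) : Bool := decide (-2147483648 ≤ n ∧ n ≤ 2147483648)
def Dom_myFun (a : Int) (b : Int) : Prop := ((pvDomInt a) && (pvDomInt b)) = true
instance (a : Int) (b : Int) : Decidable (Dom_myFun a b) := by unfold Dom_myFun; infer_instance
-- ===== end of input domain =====

-- B replaces A's string-based double loop by pure arithmetic digit extraction
-- (repeated % 10 and // 10): no string conversion at all (objective: alternative).

-- int(ch) for a single character; Pre_ guarantees every character reached is a digit,
-- so the `getD 0` default (standing for Python's ValueError) is never taken on Pre_.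
def pvIntOfChar (ch : Char) : Int := (PySem.Int.ofStr? (String.ofList [ch])).getD 0

-- ===== PORT A =====
def myFun (a : Int) (b : Int) : Int :=
  let as := (PySem.Int.toStr a).toList
  let bs := (PySem.Int.toStr b).toList
  let c : List Int :=
    as.foldl (fun c i =>
      -- for x in b: …; break  — takes only the first character of b (if any)
      match bs with
      | [] => c
      | x :: _ => c ++ [pvIntOfChar i * pvIntOfChar x]) []
  c.sum - 2

-- ===== PORT B =====
-- while a > 0: s += a % 10; a //= 10
def pvDigitSum (a : Int) : Int :=
  if h : 0 < a then PySem.Int.mod a 10 + pvDigitSum (PySem.Int.floordiv a 10) else 0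
termination_by a.toNat
decreasing_by
  have h1 : PySem.Int.floordiv a 10 = a / 10 :=
    PySem.Int.floordiv_eq_ediv_of_pos (by omega)
  rw [h1]; omega

-- while f >= 10: f //= 10
def pvLeadDigit (f : Int) : Int :=
  if h : 10 ≤ f then pvLeadDigit (PySem.Int.floordiv f 10) else f
termination_by f.toNat
decreasing_by
  have h1 : PySem.Int.floordiv f 10 = f / 10 :=
    PySem.Int.floordiv_eq_ediv_of_pos (by omega)
  rw [h1]; omega

def myFun_alt (a : Int) (b : Int) : Int :=
  pvLeadDigit b * pvDigitSum a - 2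

-- ===== PRECONDITION & SPEC =====
-- Pre_ excludes negative a or b, on which Python A raises ValueError at int('-').
def Pre_myFun (a : Int) (b : Int) : Prop := 0 ≤ a ∧ 0 ≤ b
instance (a : Int) (b : Int) : Decidable (Pre_myFun a b) := by unfold Pre_myFun; infer_instance
def pvWitness_myFun : Int × Int := (123, 45)

def Spec_myFun (a : Int) (b : Int) (out : Int) : Prop := out = myFun_alt a b
instance (a : Int) (b : Int) (out : Int) : Decidable (Spec_myFun a b out) := by unfold Spec_myFun; infer_instance

-- ===== CLAIM (what is proved, stated in full; the proofs are below) =====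
def Claim_equal_myFun : Prop := ∀ (a : Int) (b : Int), Dom_myFun a b → Pre_myFun a b → Spec_myFun a b (myFun a b)

-- ===== LEMMAS AND PROOFS =====

-- Recursive characterisation of the decimal digit string of a Nat.
def pvDecChars (n : Nat) : List Char :=
  if h : n < 10 then [Nat.digitChar n]
  else pvDecChars (n / 10) ++ [Nat.digitChar (n % 10)]
termination_by n
decreasing_by omega

theorem pvToDigitsCore_eq (f : Nat) : ∀ (n : Nat) (acc : List Char), 0 < f → n < 10 ^ f →
    Nat.toDigitsCore 10 f n acc = pvDecChars n ++ acc := by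
  induction f with
  | zero => omega
  | succ f ih =>
    intro n acc _ hn
    rw [Nat.toDigitsCore]
    rcases Nat.lt_or_ge n 10 with h10 | h10
    · have : n / 10 = 0 := Nat.div_eq_of_lt h10
      simp [this, pvDecChars, h10, Nat.mod_eq_of_lt h10]
    · have hd : n / 10 ≠ 0 := by omega
      have hf : 0 < f := by
        by_contra h
        have : f = 0 := by omega
        subst this; simp at hn; omega
      have hlt : n / 10 < 10 ^ f := by
        rw [Nat.div_lt_iff_lt_mul (by norm_num)]
        calc n < 10 ^ (f+1) := hn
          _ = 10 ^ f * 10 := by ring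
      rw [if_neg hd]
      rw [ih _ _ hf hlt]
      conv_rhs => rw [pvDecChars]
      rw [dif_neg (show ¬ n < 10 by omega)]
      simp

theorem pvToDigits_eq (n : Nat) : Nat.toDigits 10 n = pvDecChars n := by
  have h1 : n < 10 ^ (n + 1) := by
    calc n < 10 ^ n := Nat.lt_pow_self (by norm_num)
      _ ≤ 10 ^ (n+1) := Nat.pow_le_pow_right (by norm_num) (by omega)
  simpa using pvToDigitsCore_eq (n+1) n [] (by omega) h1

theorem pvDecChars_ne_nil (n : Nat) : pvDecChars n ≠ [] := by
  rw [pvDecChars]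
  split <;> simp

theorem pvIntOfChar_digitChar (d : Nat) (h : d < 10) :
    pvIntOfChar (Nat.digitChar d) = (d : Int) := by
  interval_cases d <;> decide

theorem pvDigitSum_natCast (n : Nat) :
    pvDigitSum (n : Int) = ((pvDecChars n).map pvIntOfChar).sum := by
  induction n using Nat.strong_induction_on with
  | _ n ih =>
    rw [pvDigitSum, pvDecChars]
    rcases Nat.eq_zero_or_pos n with h0 | h0
    · subst h0; norm_num; decide
    · rw [dif_pos (by exact_mod_cast h0)]
      have hm : PySem.Int.mod (n:Int) 10 = ((n % 10 : Nat) : Int) := by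
        exact_mod_cast PySem.Int.mod_natCast n 10
      have hfl : PySem.Int.floordiv (n:Int) 10 = ((n / 10 : Nat) : Int) := by
        exact_mod_cast PySem.Int.floordiv_natCast n 10
      rw [hm, hfl]
      rcases Nat.lt_or_ge n 10 with h10 | h10
      · rw [dif_pos h10]
        have : n / 10 = 0 := Nat.div_eq_of_lt h10
        rw [this, Nat.mod_eq_of_lt h10]
        simp [pvIntOfChar_digitChar n h10, pvDigitSum]
      · rw [dif_neg (show ¬ n < 10 by omega)]
        rw [ih (n/10) (by omega)]
        simp [pvIntOfChar_digitChar (n % 10) (by omega)]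
        ring

theorem pvLeadDigit_natCast (n : Nat) :
    pvLeadDigit (n : Int) = pvIntOfChar ((pvDecChars n).headI) := by
  induction n using Nat.strong_induction_on with
  | _ n ih =>
    rw [pvLeadDigit, pvDecChars]
    rcases Nat.lt_or_ge n 10 with h10 | h10
    · rw [dif_neg (show ¬ (10:Int) ≤ n by exact_mod_cast Nat.not_le.mpr h10), dif_pos h10]
      simp [pvIntOfChar_digitChar n h10]
    · rw [dif_pos (show (10:Int) ≤ n by exact_mod_cast h10), dif_neg (show ¬ n < 10 by omega)]
      have hfl : PySem.Int.floordiv (n:Int) 10 = ((n / 10 : Nat) : Int) := by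
        exact_mod_cast PySem.Int.floordiv_natCast n 10
      rw [hfl, ih (n/10) (by omega)]
      cases hcc : pvDecChars (n/10) with
      | nil => exact absurd hcc (pvDecChars_ne_nil _)
      | cons y ys => simp

-- ===== VERDICT (by name: the statement is the Claim_ definition above) =====
theorem pvToChars_nonneg (n : Int) (h : 0 ≤ n) :
    (PySem.Int.toStr n).toList = pvDecChars n.toNat := by
  rw [PySem.Int.toList_toStr]
  simp [PySem.Int.toChars, show ¬ n < 0 by omega, pvToDigits_eq]

theorem myFun_spec : Claim_equal_myFun := by
  intro a b _ hpre
  obtain ⟨ha, hb⟩ := hpre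
  unfold Spec_myFun myFun myFun_alt
  rw [pvToChars_nonneg a ha, pvToChars_nonneg b hb]
  have hbcast : (b.toNat : Int) = b := Int.toNat_of_nonneg hb
  have hacast : (a.toNat : Int) = a := Int.toNat_of_nonneg ha
  cases hbs : pvDecChars b.toNat with
  | nil => exact absurd hbs (pvDecChars_ne_nil _)
  | cons x t =>
    dsimp only
    rw [PySem.List.foldl_append_singleton_eq_map]
    rw [List.nil_append, List.sum_map_mul_right]
    have h1 : pvDigitSum a = ((pvDecChars a.toNat).map pvIntOfChar).sum := by
      conv_lhs => rw [← hacast]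
      rw [pvDigitSum_natCast]
    have h2 : pvLeadDigit b = pvIntOfChar x := by
      conv_lhs => rw [← hbcast]
      rw [pvLeadDigit_natCast, hbs]
      rfl
    rw [h1, h2]
    ring
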